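-- pv_equiv track=rewrite | github.com/ljtijhuis/AdventOfCode | 2015/src/day_5.py | has_pair
-- ===== SOURCE A (Python) =====
-- def has_pair(s):
--     pairs = {}
--     for i in range(0, len(s)-1):
--         pair = s[i:i+2]
--         if pair not in pairs:
--             pairs.update({pair: [i]})
--         else:
--             pairs[pair].append(i)
--
--     for pair, indeces in pairs.items():
--         # just compare the first and last index they occur as they should be furthest apart
--         if len(indeces) > 1 and indeces[len(indeces)-1] - indeces[0] > 1:
--             return True
--     return False
-- ===== SOURCE B (Python) =====
-- def has_pair(s):
--     # Brute-force pairwise comparison: does any two-char pair recur at least 2 apart?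
--     n = len(s)
--     return any(s[i:i+2] == s[j:j+2]
--                for i in range(n - 1)
--                for j in range(i + 2, n - 1))
-- ===== Notes on version B (the rewrite author's own statement) =====
-- stated objective: simpler
-- what changed: Replaces the two-pass build-a-dict-of-index-lists-then-scan structure with a single direct double scan comparing each pair against every pair at least two positions later, returning at the first hit; no dictionary at all.
import Mathlib
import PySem

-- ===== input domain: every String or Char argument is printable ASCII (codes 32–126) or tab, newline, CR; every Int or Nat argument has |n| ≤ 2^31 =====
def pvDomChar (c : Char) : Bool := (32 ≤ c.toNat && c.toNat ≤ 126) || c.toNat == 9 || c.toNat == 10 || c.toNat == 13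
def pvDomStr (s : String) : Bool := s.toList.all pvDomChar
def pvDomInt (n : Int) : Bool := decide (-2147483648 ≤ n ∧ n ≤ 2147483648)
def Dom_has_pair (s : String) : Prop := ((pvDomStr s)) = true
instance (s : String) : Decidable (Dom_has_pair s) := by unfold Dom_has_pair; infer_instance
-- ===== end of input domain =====

-- B replaces A's two-pass structure (build a dict of all index lists per pair, then scan the
-- dict) with a single direct double scan comparing each pair against every pair at least two
-- positions later (simpler: no dictionary at all); same return value on every input.

-- s[i:i+2] on the character list (Python computes this slice inline in both versions)
def pvPair (l : List Char) (i : Int) : List Char :=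
  PySem.List.slice l (some i) (some (i + 2))

-- ===== PORT A =====
def has_pair (s : String) : Bool :=
  let l := s.toList
  let pairs : PySem.Dict (List Char) (List Int) :=
    (PySem.List.pyRange 0 (PySem.List.len l - 1) 1).foldl
      (fun d i =>
        let pair := pvPair l i
        if d.contains pair = false then d.insert pair [i]
        else d.modify pair [] (fun xs => xs ++ [i]))
      PySem.Dict.empty
  -- second loop with early 'return True' = any over the items;
  -- indeces[len(indeces)-1] / indeces[0]: the indices are in range (the guard 1 < len comes
  -- first, values are nonempty), so pyGetD is exactly the Python indexing here
  pairs.items.any (fun pr =>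
    decide ((1 : Int) < PySem.List.len pr.2) &&
    decide (1 < PySem.List.pyGetD pr.2 (PySem.List.len pr.2 - 1) 0 - PySem.List.pyGetD pr.2 0 0))

-- ===== PORT B =====
def has_pair_alt (s : String) : Bool :=
  let l := s.toList
  let n := PySem.List.len l
  (PySem.List.pyRange 0 (n - 1) 1).any (fun i =>
    (PySem.List.pyRange (i + 2) (n - 1) 1).any (fun j =>
      pvPair l i == pvPair l j))

-- ===== PRECONDITION & SPEC =====
def Spec_has_pair (s : String) (out : Bool) : Prop := out = has_pair_alt s
instance (s : String) (out : Bool) : Decidable (Spec_has_pair s out) := by unfold Spec_has_pair; infer_instance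

-- ===== CLAIM (what is proved, stated in full; the proofs are below) =====
def Claim_equal_has_pair : Prop := ∀ (s : String), Dom_has_pair s → Spec_has_pair s (has_pair s)

-- ===== LEMMAS AND PROOFS =====

-- the common characterisation: some two-character pair recurs at distance ≥ 2
def pvE (l : List Char) : Prop :=
  ∃ i j : Int, 0 ≤ i ∧ i + 2 ≤ j ∧ j < (l.length : Int) - 1 ∧ pvPair l i = pvPair l j

lemma pvAlt_iff (s : String) : has_pair_alt s = true ↔ pvE s.toList := by
  unfold has_pair_alt pvE
  simp only [List.any_eq_true, PySem.List.mem_pyRange_one, PySem.List.len_eq, beq_iff_eq]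
  constructor
  · rintro ⟨i, ⟨hi0, hi1⟩, j, ⟨hj0, hj1⟩, h⟩
    exact ⟨i, j, hi0, hj0, hj1, h⟩
  · rintro ⟨i, j, hi0, hj0, hj1, h⟩
    exact ⟨i, ⟨hi0, by omega⟩, j, ⟨hj0, hj1⟩, h⟩

-- inserting a fresh key is the same dict as modify-with-default-[] (A's two branches agree)
lemma pv_insert_eq_modify {κ : Type} [BEq κ] [LawfulBEq κ] {β : Type}
    (d : PySem.Dict κ (List β)) (p : κ) (i : β) (h : d.contains p = false) :
    d.insert p [i] = d.modify p [] (fun xs => xs ++ [i]) := by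
  simp [PySem.Dict.insert, PySem.Dict.modify, h, PySem.Dict.getD_of_not_contains (h := h)]

-- A's first loop collapses to a uniform modify-fold
lemma pv_fold_eq (l : List Char) (R : List Int) :
    R.foldl (fun d i =>
        let pair := pvPair l i
        if d.contains pair = false then d.insert pair [i]
        else d.modify pair [] (fun xs => xs ++ [i])) PySem.Dict.empty
    = R.foldl (fun d i => d.modify (pvPair l i) [] (fun xs => xs ++ [i])) PySem.Dict.empty := by
  congr 1
  funext d i
  by_cases h : d.contains (pvPair l i) = false
  · simp only [h, pv_insert_eq_modify d _ _ h]; simp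
  · simp [h]

-- in a strictly sorted list containing x < y, the first element bounds x from below
-- and the last bounds y from above (and there are at least two elements)
lemma sorted_bounds (v : List Int) (hv : v.Pairwise (· < ·)) (x y : Int)
    (hx : x ∈ v) (hy : y ∈ v) (hxy : x < y) :
    1 < v.length ∧ PySem.List.pyGetD v 0 0 ≤ x ∧ y ≤ PySem.List.pyGetD v ((v.length : Int) - 1) 0 := by
  obtain ⟨kx, hkx, ex⟩ := List.mem_iff_getElem.mp hx
  obtain ⟨ky, hky, ey⟩ := List.mem_iff_getElem.mp hy
  have hne : kx ≠ ky := by rintro rfl; omega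
  have hlen : 1 < v.length := by omega
  have hg := List.pairwise_iff_getElem.mp hv
  have h0 : PySem.List.pyGetD v 0 0 = v[0]'(by omega) := by
    rw [PySem.List.pyGetD_eq_getElem v (i := 0) 0 (by omega) (by omega)]
    norm_num
  have h1 : PySem.List.pyGetD v ((v.length : Int) - 1) 0 = v[v.length - 1]'(by omega) := by
    rw [PySem.List.pyGetD_eq_getElem v (i := (v.length : Int) - 1) 0 (by omega) (by omega)]
    congr 1
    omega
  refine ⟨hlen, ?_, ?_⟩
  · rw [h0, ← ex]
    rcases Nat.eq_zero_or_pos kx with h | h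
    · subst h; exact le_refl _
    · exact le_of_lt (hg 0 kx (by omega) hkx h)
  · rw [h1, ← ey]
    rcases Nat.lt_or_ge ky (v.length - 1) with h | h
    · exact le_of_lt (hg ky (v.length - 1) hky (by omega) h)
    · have : ky = v.length - 1 := by omega
      subst this; exact le_refl _

lemma pyGetD_mem (v : List Int) (h : 1 < v.length) :
    PySem.List.pyGetD v 0 0 ∈ v ∧ PySem.List.pyGetD v ((v.length : Int) - 1) 0 ∈ v := by
  constructor
  · rw [PySem.List.pyGetD_eq_getElem v (i := 0) 0 (by omega) (by omega)]
    exact List.getElem_mem _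
  · rw [PySem.List.pyGetD_eq_getElem v (i := (v.length : Int) - 1) 0 (by omega) (by omega)]
    exact List.getElem_mem _

lemma pvA_iff (s : String) : has_pair s = true ↔ pvE s.toList := by
  unfold has_pair
  simp only [PySem.List.len_eq, pv_fold_eq]
  set l := s.toList with hl
  set R := PySem.List.pyRange 0 ((l.length : Int) - 1) 1 with hR
  set pairs := R.foldl (fun d i => d.modify (pvPair l i) [] (fun xs => xs ++ [i]))
      PySem.Dict.empty with hpairs
  have hnodup : pairs.keys.Nodup := by
    rw [hpairs]
    exact PySem.Dict.nodup_keys_foldl_modify_key R (pvPair l) [] (fun _ i xs => xs ++ [i]) _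
      (by simp [PySem.Dict.keys_empty])
  have hkeys : pairs.keys = PySem.Set.ofList (R.map (pvPair l)) := by
    rw [hpairs, PySem.Dict.keys_foldl_modify_key R (pvPair l) [] (fun _ i xs => xs ++ [i]),
      PySem.Dict.keys_empty, PySem.Set.update_nil_left]
  have hgetD : ∀ c, pairs.getD c [] = R.filter (fun i => pvPair l i == c) := by
    intro c
    have hm : pairs = (R.map (fun i => (pvPair l i, i))).foldl
        (fun d p => d.modify p.1 [] fun xs => xs ++ [p.2]) PySem.Dict.empty := by
      rw [hpairs, List.foldl_map]
    rw [hm, PySem.Dict.getD_foldl_modify_append, PySem.Dict.getD_empty, List.filter_map,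
      List.map_map]
    simp [Function.comp_def]
  rw [PySem.Dict.items_eq_map_keys pairs hnodup [], List.any_map, hkeys]
  simp only [List.any_eq_true, PySem.Set.mem_ofList, List.mem_map, Function.comp,
    Bool.and_eq_true, decide_eq_true_iff, hgetD]
  constructor
  · rintro ⟨c, ⟨i0, hi0R, rfl⟩, hlen, hdiff⟩
    set v := List.filter (fun i => pvPair l i == pvPair l i0) R with hv
    have hlen' : 1 < v.length := by exact_mod_cast hlen
    obtain ⟨ha, hb⟩ := pyGetD_mem v hlen'
    have ha' := List.mem_filter.mp ha
    have hb' := List.mem_filter.mp hb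
    have haR := PySem.List.mem_pyRange_one.mp (hR ▸ ha'.1)
    have hbR := PySem.List.mem_pyRange_one.mp (hR ▸ hb'.1)
    refine ⟨PySem.List.pyGetD v 0 0, PySem.List.pyGetD v ((v.length : Int) - 1) 0,
      haR.1, by omega, hbR.2, ?_⟩
    have e1 : pvPair l (PySem.List.pyGetD v 0 0) = pvPair l i0 := by
      simpa using ha'.2
    have e2 : pvPair l (PySem.List.pyGetD v ((v.length : Int) - 1) 0) = pvPair l i0 := by
      simpa using hb'.2
    rw [e1, e2]
  · rintro ⟨i, j, hi0, hij, hjn, heq⟩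
    have hiR : i ∈ R := by rw [hR]; exact PySem.List.mem_pyRange_one.mpr ⟨hi0, by omega⟩
    have hjR : j ∈ R := by rw [hR]; exact PySem.List.mem_pyRange_one.mpr ⟨by omega, hjn⟩
    set v := List.filter (fun k => pvPair l k == pvPair l i) R with hv
    have hiv : i ∈ v := List.mem_filter.mpr ⟨hiR, by simp⟩
    have hjv : j ∈ v := List.mem_filter.mpr ⟨hjR, by simp [heq]⟩
    have hsort : v.Pairwise (· < ·) := by
      rw [hv, hR]
      exact (PySem.List.pairwise_lt_pyRange_one 0 _).filter _
    obtain ⟨h1, h2, h3⟩ := sorted_bounds v hsort i j hiv hjv (by omega)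
    refine ⟨pvPair l i, ⟨i, hiR, rfl⟩, ?_, ?_⟩
    · rw [← hv]; exact_mod_cast h1
    · rw [← hv]; omega

-- ===== VERDICT (by name: the statement is the Claim_ definition above) =====
theorem has_pair_spec : Claim_equal_has_pair := by
  intro s _
  unfold Spec_has_pair
  exact Bool.eq_iff_iff.mpr ((pvA_iff s).trans (pvAlt_iff s).symm)
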